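-- pv_equiv track=rewrite | github.com/alexander-ra/rlPlanRevised | scripts/add_glossary_markers.py | strip_inline_code
-- ===== SOURCE A (Python) =====
-- def strip_inline_code(line: str):
--     """
--     Return a version of line where backtick spans are replaced with a
--     placeholder, and a list of (start, end) spans that are code.
--     """
--     code_spans = []
--     result = list(line)
--     i = 0
--     while i < len(line):
--         if line[i] == '`':
--             j = i + 1
--             while j < len(line) and line[j] != '`':
--                 j += 1
--             code_spans.append((i, j + 1))
--             for k in range(i, min(j + 1, len(line))):
--                 result[k] = '\x00'  # placeholder
--             i = j + 1
--         else:
--             i += 1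
--     return ''.join(result), code_spans
-- ===== SOURCE B (Python) =====
-- def strip_inline_code(line: str):
--     """Two-pass version: first collect every backtick index, then pair them
--     up and rewrite each span with a slice assignment."""
--     n = len(line)
--     ticks = []
--     k = 0
--     while k < n:
--         if line[k] == '`':
--             ticks.append(k)
--         k += 1
--     result = list(line)
--     spans = []
--     t = 0
--     while t < len(ticks):
--         o = ticks[t]
--         close = ticks[t + 1] if t + 1 < len(ticks) else n
--         spans.append((o, close + 1))
--         end = min(close + 1, n)
--         result[o:end] = '\x00' * (end - o)
--         t += 2
--     return ''.join(result), spans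
-- ===== Notes on version B (the rewrite author's own statement) =====
-- stated objective: alternative
-- what changed: A's single interleaved scan with an inner closing-backtick hunt is replaced by two passes: a table of all backtick indices, then a pairing pass over that table with slice assignment for the fills.
import Mathlib
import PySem

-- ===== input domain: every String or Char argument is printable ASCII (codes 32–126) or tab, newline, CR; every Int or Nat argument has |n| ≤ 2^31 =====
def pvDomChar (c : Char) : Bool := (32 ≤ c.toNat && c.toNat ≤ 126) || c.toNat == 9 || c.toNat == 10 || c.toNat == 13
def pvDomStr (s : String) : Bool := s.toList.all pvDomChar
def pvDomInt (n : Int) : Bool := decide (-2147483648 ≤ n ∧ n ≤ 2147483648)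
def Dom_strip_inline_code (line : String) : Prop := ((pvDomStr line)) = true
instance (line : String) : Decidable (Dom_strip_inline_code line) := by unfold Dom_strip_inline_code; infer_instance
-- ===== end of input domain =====

-- B replaces A's interleaved scan (inner while hunting the closing backtick) by two passes:
-- an index table of all backtick positions, then a pairing pass; objective: alternative decomposition.

-- ===== PORT A =====
-- inner 'while j < len(line) and line[j] != '`': j += 1'
def pvFindJ (cs : List Char) (j : Nat) : Nat :=
  if h : j < cs.length then
    if cs[j] = '`' then j else pvFindJ cs (j + 1)
  else j
termination_by cs.length - j

theorem pvFindJ_ge (cs : List Char) (j : Nat) : j ≤ pvFindJ cs j := by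
  unfold pvFindJ
  split
  · split
    · exact le_refl _
    · exact le_trans (Nat.le_succ j) (pvFindJ_ge cs (j + 1))
  · exact le_refl _
termination_by cs.length - j

-- 'for k in range(i, min(j+1, len(line))): result[k] = '\x00''
def pvFillA (r : List Char) (a b : Nat) : List Char :=
  (List.range' a (b - a)).foldl (fun acc k => acc.set k (Char.ofNat 0)) r

-- the outer while loop of A
def pvALoop (cs : List Char) (i : Nat) (r : List Char) (sp : List (Int × Int)) :
    List Char × List (Int × Int) :=
  if h : i < cs.length then
    if cs[i] = '`' then
      let j := pvFindJ cs (i + 1)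
      pvALoop cs (j + 1) (pvFillA r i (min (j + 1) cs.length)) (sp ++ [((i : Int), (j : Int) + 1)])
    else
      pvALoop cs (i + 1) r sp
  else (r, sp)
termination_by cs.length + 1 - i
decreasing_by
  · have := pvFindJ_ge cs (i + 1); omega
  · omega

def strip_inline_code (line : String) : String × (List (Int × Int)) :=
  let cs := line.toList
  let (r, sp) := pvALoop cs 0 cs []
  (String.mk r, sp)

-- ===== PORT B =====
-- first pass: 'while k < n: if line[k] == '`': ticks.append(k); k += 1'
def pvTicksFrom (cs : List Char) (k : Nat) : List Nat :=
  if h : k < cs.length then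
    if cs[k] = '`' then k :: pvTicksFrom cs (k + 1) else pvTicksFrom cs (k + 1)
  else []
termination_by cs.length - k

-- 'result[o:end] = '\x00' * (end - o)'  (slice assignment, o ≤ end ≤ len)
def pvFillB (r : List Char) (a b : Nat) : List Char :=
  r.take a ++ List.replicate (b - a) (Char.ofNat 0) ++ r.drop b

-- second pass: consume the tick table two at a time ('t += 2')
def pvBPair (cs : List Char) (ticks : List Nat) (r : List Char) (sp : List (Int × Int)) :
    List Char × List (Int × Int) :=
  match ticks with
  | [] => (r, sp)
  | [o] =>
      (pvFillB r o (min (cs.length + 1) cs.length), sp ++ [((o : Int), (cs.length : Int) + 1)])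
  | o :: c :: rest =>
      pvBPair cs rest (pvFillB r o (min (c + 1) cs.length)) (sp ++ [((o : Int), (c : Int) + 1)])

def strip_inline_code_alt (line : String) : String × (List (Int × Int)) :=
  let cs := line.toList
  let (r, sp) := pvBPair cs (pvTicksFrom cs 0) cs []
  (String.mk r, sp)

-- ===== PRECONDITION & SPEC =====
def Spec_strip_inline_code (line : String) (out : String × (List (Int × Int))) : Prop := out = strip_inline_code_alt line
instance (line : String) (out : String × (List (Int × Int))) : Decidable (Spec_strip_inline_code line out) := by unfold Spec_strip_inline_code; infer_instance

-- ===== CLAIM (what is proved, stated in full; the proofs are below) =====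
def Claim_equal_strip_inline_code : Prop := ∀ (line : String), Dom_strip_inline_code line → Spec_strip_inline_code line (strip_inline_code line)

-- ===== LEMMAS AND PROOFS =====

theorem ticks_step (cs : List Char) (j : Nat) :
    pvTicksFrom cs j =
      if h : j < cs.length then
        (if cs[j] = '`' then j :: pvTicksFrom cs (j + 1) else pvTicksFrom cs (j + 1))
      else [] := by
  rw [pvTicksFrom]

theorem findJ_step (cs : List Char) (j : Nat) :
    pvFindJ cs j =
      if h : j < cs.length then (if cs[j] = '`' then j else pvFindJ cs (j + 1)) else j := by
  rw [pvFindJ]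

-- characterisation of pvFindJ by the tick table
theorem ticks_spec (cs : List Char) (j : Nat) (hj : j ≤ cs.length) :
    (pvTicksFrom cs j = [] → pvFindJ cs j = cs.length) ∧
    (∀ c rest, pvTicksFrom cs j = c :: rest →
      pvFindJ cs j = c ∧ rest = pvTicksFrom cs (c + 1) ∧ j ≤ c ∧ c < cs.length) := by
  rw [ticks_step cs j, findJ_step cs j]
  split
  · rename_i h
    split
    · constructor
      · intro hnil; cases hnil
      · intro c rest hcons
        injection hcons with h1 h2
        subst h1; subst h2
        exact ⟨rfl, rfl, le_refl _, h⟩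
    · have ih := ticks_spec cs (j + 1) (by omega)
      constructor
      · intro hnil; exact ih.1 hnil
      · intro c rest hcons
        obtain ⟨e1, e2, e3, e4⟩ := ih.2 c rest hcons
        exact ⟨e1, e2, by omega, e4⟩
  · constructor
    · intro _; omega
    · intro c rest hcons; cases hcons
termination_by cs.length - j

-- the two fill mechanisms agree (A's per-index sets, B's slice assignment)
theorem fill_core (m : Nat) : ∀ (a : Nat) (r : List Char), a + m ≤ r.length →
    (List.range' a m).foldl (fun acc k => acc.set k (Char.ofNat 0)) r =
      r.take a ++ List.replicate m (Char.ofNat 0) ++ r.drop (a + m) := by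
  induction m with
  | zero => intro a r _; simp
  | succ m ih =>
      intro a r hle
      rw [List.range'_succ]
      simp only [List.foldl_cons]
      rw [ih (a + 1) (r.set a (Char.ofNat 0)) (by simp; omega)]
      have ha : a < r.length := by omega
      rw [List.set_eq_take_append_cons_drop, if_pos ha]
      rw [List.take_append, List.drop_append]
      simp [List.length_take, Nat.min_eq_left (le_of_lt ha), List.replicate_succ]
      have h1 : List.take (a + 1) (List.take a r) = List.take a r := by
        rw [List.take_take]; congr 1; omega
      have h2 : List.drop (a + 1 + m) (List.take a r) = [] :=
        List.drop_eq_nil_of_le (by simp [List.length_take]; omega)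
      have h3 : a + 1 + m - a = m + 1 := by omega
      rw [h1, h2, h3]
      simp [List.drop_drop]
      congr 1
      omega

theorem fill_eq (r : List Char) (a b : Nat) (h1 : a ≤ b) (h2 : b ≤ r.length) :
    pvFillA r a b = pvFillB r a b := by
  unfold pvFillA pvFillB
  have := fill_core (b - a) a r (by omega)
  rw [this]
  congr 2
  omega

theorem fillB_length (r : List Char) (a b : Nat) (h1 : a ≤ b) (h2 : b ≤ r.length) :
    (pvFillB r a b).length = r.length := by
  unfold pvFillB
  simp [List.length_take, List.length_replicate]
  omega

-- main loop correspondence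
theorem loop_eq (cs : List Char) (i : Nat) : ∀ (r : List Char) (sp : List (Int × Int)),
    r.length = cs.length →
    pvALoop cs i r sp = pvBPair cs (pvTicksFrom cs i) r sp := by
  intro r sp hr
  unfold pvALoop
  split
  · rename_i hi
    by_cases hc : cs[i] = '`'
    · simp only [if_pos hc]
      have hticks : pvTicksFrom cs i = i :: pvTicksFrom cs (i + 1) := by
        rw [ticks_step cs i, dif_pos hi, if_pos hc]
      rw [hticks]
      rcases hnext : pvTicksFrom cs (i + 1) with _ | ⟨c, rest⟩
      · -- no closing backtick: j = len
        have hj : pvFindJ cs (i + 1) = cs.length := (ticks_spec cs (i + 1) (by omega)).1 hnext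
        simp only [hj]
        rw [show pvALoop cs (cs.length + 1) (pvFillA r i (min (cs.length + 1) cs.length))
              (sp ++ [((i : Int), (cs.length : Int) + 1)]) =
            (pvFillA r i (min (cs.length + 1) cs.length),
              sp ++ [((i : Int), (cs.length : Int) + 1)]) from by
          rw [pvALoop, dif_neg (by omega)]]
        unfold pvBPair
        rw [fill_eq r i (min (cs.length + 1) cs.length) (by omega) (by omega)]
      · -- closing backtick at c
        obtain ⟨e1, e2, e3, e4⟩ := (ticks_spec cs (i + 1) (by omega)).2 c rest hnext
        simp only [e1]
        rw [fill_eq r i (min (c + 1) cs.length) (by omega) (by omega)]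
        have hlen : (pvFillB r i (min (c + 1) cs.length)).length = cs.length := by
          rw [fillB_length r i (min (c + 1) cs.length) (by omega) (by omega)]; exact hr
        have hrec := loop_eq cs (c + 1)
          (pvFillB r i (min (c + 1) cs.length)) (sp ++ [((i : Int), (c : Int) + 1)]) hlen
        rw [hrec, ← e2]
        rfl
    · simp only [if_neg hc]
      have hticks : pvTicksFrom cs i = pvTicksFrom cs (i + 1) := by
        rw [ticks_step cs i, dif_pos hi, if_neg hc]
      rw [hticks]
      exact loop_eq cs (i + 1) r sp hr
  · rename_i hi
    have hticks : pvTicksFrom cs i = [] := by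
      rw [ticks_step cs i, dif_neg hi]
    rw [hticks]
    rfl
termination_by cs.length + 1 - i
decreasing_by
  · omega
  · omega
-- ===== VERDICT (by name: the statement is the Claim_ definition above) =====
theorem strip_inline_code_spec : Claim_equal_strip_inline_code := by
  intro line _
  unfold Spec_strip_inline_code strip_inline_code strip_inline_code_alt
  simp only
  rw [loop_eq line.toList 0 line.toList [] rfl]
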